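-- pv_equiv track=rewrite | github.com/google-research/language | language/search_agents/muzero/utils.py | bert_tokens_to_words
-- ===== SOURCE A (Python) =====
-- from typing import List, Dict, Callable, Sequence, Tuple
--
-- def bert_tokens_to_words(bert_tokens: List[str]) -> List[str]:
--   """Maps word-pieces to the full word they are a part of.
--
--   Given a word-piece tokenized sequence, returns a sequence of the same length
--   which, at position i, contains the full word to which the word piece at
--   position i belongs.
--   For example:
--     input:   wh   ##y  do   ##es  it  do  th   ##is
--     output:  why  why  does does  it  do  this this
--
--   Args:
--     bert_tokens:  A sequence of word pieces.
--
--   Returns: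
--     A sequence of equal length as `bert_tokens` with the full word to which each
--     word-piece in `bert_tokens` belongs.
--   """
--
--   words = []
--   i = 0
--   while i < len(bert_tokens):
--     full_word = bert_tokens[i]
--     num_subwords = 1
--     while i < (len(bert_tokens) - 1) and bert_tokens[i + 1].startswith('##'):
--       full_word += bert_tokens[i + 1].replace('##', '')
--       i += 1
--       num_subwords += 1
--     i += 1
--     words += [full_word] * num_subwords
--   return words
-- ===== SOURCE B (Python) =====
-- def bert_tokens_to_words(bert_tokens):
--     # First pass: segment the tokens into groups of word pieces.
--     groups = []
--     for t in bert_tokens: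
--         if groups and t.startswith('##'):
--             groups[-1].append(t)
--         else:
--             groups.append([t])
--     # Second pass: expand each group into len(group) copies of its full word.
--     words = []
--     for g in groups:
--         word = g[0] + ''.join(tok.replace('##', '') for tok in g[1:])
--         words.extend([word] * len(g))
--     return words
-- ===== Notes on version B (the rewrite author's own statement) =====
-- stated objective: alternative
-- what changed: Replaced the nested while-scan that builds and emits each word in one pass with a two-phase decomposition: a single fold segments the tokens into groups, then a separate pass expands each group into repeated full words.
import Mathlib
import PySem

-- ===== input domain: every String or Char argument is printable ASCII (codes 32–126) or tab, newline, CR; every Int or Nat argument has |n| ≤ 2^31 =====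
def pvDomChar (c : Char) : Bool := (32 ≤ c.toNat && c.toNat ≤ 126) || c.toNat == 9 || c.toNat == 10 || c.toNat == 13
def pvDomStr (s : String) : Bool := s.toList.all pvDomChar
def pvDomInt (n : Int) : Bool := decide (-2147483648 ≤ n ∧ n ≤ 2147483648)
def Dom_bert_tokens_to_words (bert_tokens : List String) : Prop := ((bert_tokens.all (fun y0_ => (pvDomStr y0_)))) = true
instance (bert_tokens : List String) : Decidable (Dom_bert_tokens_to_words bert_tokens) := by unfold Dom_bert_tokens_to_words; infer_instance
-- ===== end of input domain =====

-- B replaces A's nested while-scan with a two-phase decomposition (segment into groups, then expand); same cost, different structure.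


-- ===== PORT A =====
-- Inner while loop of A: collect the maximal run of leading '##'-tokens, return (run, remainder).
def pvContTokens : List String → List String × List String
  | [] => ([], [])
  | t :: ts =>
    if PySem.Str.startswith t "##" then
      let (cs, r) := pvContTokens ts
      (t :: cs, r)
    else ([], t :: ts)

theorem pvContTokens_snd_length_le : ∀ (ts : List String), (pvContTokens ts).2.length ≤ ts.length
  | [] => Nat.le_refl _
  | t :: ts => by
    simp only [pvContTokens]
    split
    · exact Nat.le_trans (pvContTokens_snd_length_le ts) (Nat.le_succ _)
    · simp

-- Outer while loop of A: take the word piece at i, extend with the run of '##'-continuations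
-- (each appended via replace('##','')), emit (1 + run length) copies, continue after the run.
def bert_tokens_to_words (bert_tokens : List String) : List String :=
  match bert_tokens with
  | [] => []
  | t :: ts =>
    let p := pvContTokens ts
    let full_word := p.1.foldl (fun w c => w ++ PySem.Str.replace c "##" "") t
    List.replicate (1 + p.1.length) full_word ++ bert_tokens_to_words p.2
termination_by bert_tokens.length
decreasing_by
  exact Nat.lt_succ_of_le (pvContTokens_snd_length_le ts)

-- ===== PORT B =====
-- groups[-1].append(t)
def pvAppendLast (gs : List (List String)) (t : String) : List (List String) :=
  match gs with
  | [] => [[t]]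
  | [g] => [g ++ [t]]
  | g :: g' :: rest => g :: pvAppendLast (g' :: rest) t

-- First pass of Source B: segment tokens into groups.
def pvGroups (bert_tokens : List String) : List (List String) :=
  bert_tokens.foldl
    (fun groups t =>
      if groups ≠ [] ∧ PySem.Str.startswith t "##" then pvAppendLast groups t
      else groups ++ [[t]])
    []

-- Second pass of Source B: g[0] + ''.join(tok.replace('##','') for tok in g[1:]); words.extend([word]*len(g)).
def pvExpandGroup (g : List String) : List String :=
  match g with
  | [] => []
  | h :: rest =>
    let word := h ++ PySem.Str.join "" (rest.map (fun tok => PySem.Str.replace tok "##" ""))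
    List.replicate (h :: rest).length word

def bert_tokens_to_words_alt (bert_tokens : List String) : List String :=
  (pvGroups bert_tokens).foldl (fun words g => words ++ pvExpandGroup g) []

-- ===== PRECONDITION & SPEC =====
def Spec_bert_tokens_to_words (bert_tokens : List String) (out : List String) : Prop := out = bert_tokens_to_words_alt bert_tokens
instance (bert_tokens : List String) (out : List String) : Decidable (Spec_bert_tokens_to_words bert_tokens out) := by unfold Spec_bert_tokens_to_words; infer_instance

-- ===== CLAIM (what is proved, stated in full; the proofs are below) =====
def Claim_equal_bert_tokens_to_words : Prop := ∀ (bert_tokens : List String), Dom_bert_tokens_to_words bert_tokens → Spec_bert_tokens_to_words bert_tokens (bert_tokens_to_words bert_tokens)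

-- ===== LEMMAS AND PROOFS =====

-- canonical grouping defined by A's run-scan
def pvGrp (xs : List String) : List (List String) :=
  match xs with
  | [] => []
  | t :: ts =>
    let p := pvContTokens ts
    (t :: p.1) :: pvGrp p.2
termination_by xs.length
decreasing_by
  exact Nat.lt_succ_of_le (pvContTokens_snd_length_le ts)

theorem pvGrp_nil : pvGrp [] = [] := by rw [pvGrp]

theorem pvGrp_cons (t : String) (ts : List String) :
    pvGrp (t :: ts) = (t :: (pvContTokens ts).1) :: pvGrp (pvContTokens ts).2 := by
  rw [pvGrp]

theorem pvAppendLast_append (init : List (List String)) (g : List String) (t : String) :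
    pvAppendLast (init ++ [g]) t = init ++ [g ++ [t]] := by
  induction init with
  | nil => rfl
  | cons h tl ih =>
    cases tl with
    | nil => simp [pvAppendLast]
    | cons h' tl' => simpa [pvAppendLast] using ih

theorem pvGroups_loop (ts : List String) : ∀ (init : List (List String)) (g : List String),
    ts.foldl
      (fun groups t =>
        if groups ≠ [] ∧ PySem.Str.startswith t "##" then pvAppendLast groups t
        else groups ++ [[t]])
      (init ++ [g])
    = init ++ [g ++ (pvContTokens ts).1] ++ pvGrp (pvContTokens ts).2 := by
  induction ts with
  | nil => intro init g; simp [pvContTokens, pvGrp_nil]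
  | cons t ts ih =>
    intro init g
    by_cases h : PySem.Chars.startswith t.toList ['#', '#'] = true
    · have hne : init ++ [g] ≠ [] := by simp
      simp only [List.foldl_cons]
      rw [if_pos (And.intro hne (by simpa using h)), pvAppendLast_append, ih init (g ++ [t])]
      simp [pvContTokens, h]
    · have hf : PySem.Chars.startswith t.toList ['#', '#'] = false := by simpa using h
      simp only [List.foldl_cons]
      rw [if_neg (fun hc => h (by simpa using hc.2)), ih (init ++ [g]) [t]]
      simp [pvContTokens, hf, pvGrp_cons]
  
theorem pvGroups_eq_pvGrp (xs : List String) : pvGroups xs = pvGrp xs := by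
  cases xs with
  | nil => simp [pvGroups, pvGrp_nil]
  | cons t ts =>
    unfold pvGroups
    simp only [List.foldl_cons, if_neg (by simp : ¬([] ≠ ([] : List (List String)) ∧ PySem.Str.startswith t "##" = true))]
    have := pvGroups_loop ts [] [t]
    simpa [pvGrp_cons] using this

theorem pvJoinEmpty_cons (x : String) (xs : List String) :
    PySem.Str.join "" (x :: xs) = x ++ PySem.Str.join "" xs := by
  cases xs with
  | nil =>
    apply String.toList_injective
    simp [PySem.Str.join, PySem.Chars.join, List.intercalate]
  | cons y ys =>
    apply String.toList_injective
    simp [PySem.Str.join, PySem.Chars.join_cons_cons]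

theorem pvFoldWord (cs : List String) : ∀ (t : String),
    cs.foldl (fun w c => w ++ PySem.Str.replace c "##" "") t
    = t ++ PySem.Str.join "" (cs.map (fun tok => PySem.Str.replace tok "##" "")) := by
  induction cs with
  | nil =>
    intro t
    apply String.toList_injective
    simp [PySem.Str.join, PySem.Chars.join, List.intercalate]
  | cons c cs ih =>
    intro t
    simp only [List.foldl_cons, List.map_cons, ih, pvJoinEmpty_cons, ← String.append_assoc]

theorem portA_eq_flat (xs : List String) :
    bert_tokens_to_words xs = (pvGrp xs).flatMap pvExpandGroup := by
  induction xs using bert_tokens_to_words.induct with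
  | case1 => simp [bert_tokens_to_words, pvGrp_nil]
  | case2 t ts a ih =>
    rw [bert_tokens_to_words, pvGrp_cons]
    simp only [List.flatMap_cons]
    rw [← ih]
    congr 1
    simp [pvExpandGroup, pvFoldWord, Nat.add_comm]

theorem bert_tokens_to_words_eq (xs : List String) :
    bert_tokens_to_words xs = bert_tokens_to_words_alt xs := by
  unfold bert_tokens_to_words_alt
  rw [PySem.List.foldl_append_eq_flatMap, pvGroups_eq_pvGrp, List.nil_append, portA_eq_flat]

-- ===== VERDICT (by name: the statement is the Claim_ definition above) =====
theorem bert_tokens_to_words_spec : Claim_equal_bert_tokens_to_words := by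
  intro xs _
  exact bert_tokens_to_words_eq xs
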